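-- pv_equiv track=rewrite | github.com/libraz/midi-sketch-bach | scripts/extract_gravity_reference.py | pitch_to_scale_degree
-- ===== SOURCE A (Python) =====
-- MAJOR_SCALE = [0, 2, 4, 5, 7, 9, 11]
--
-- MINOR_SCALE = [0, 2, 3, 5, 7, 8, 10]
--
-- def pitch_to_scale_degree(pitch: int, key: int, is_minor: bool) -> int:
--     """Convert MIDI pitch to scale degree (0-6).
--
--     Args:
--         pitch: MIDI pitch number.
--         key: Key root as pitch class (0=C..11=B).
--         is_minor: True for minor key.
--
--     Returns:
--         Scale degree 0-6.
--     """
--     scale = MINOR_SCALE if is_minor else MAJOR_SCALE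
--     relative_pc = (pitch % 12 - key) % 12
--
--     best_deg = 0
--     best_dist = 99
--     for idx, scale_pc in enumerate(scale):
--         dist = min(abs(relative_pc - scale_pc), 12 - abs(relative_pc - scale_pc))
--         if dist < best_dist:
--             best_dist = dist
--             best_deg = idx
--
--     return best_deg
-- ===== SOURCE B (Python) =====
-- MAJOR_SCALE = [0, 2, 4, 5, 7, 9, 11]
--
-- MINOR_SCALE = [0, 2, 3, 5, 7, 8, 10]
--
-- # Precomputed nearest-degree table for each relative pitch class 0..11
-- # (ties broken toward the earliest scale index, matching the strict '<' scan).
-- _MAJOR_DEGREE = [0, 0, 1, 1, 2, 3, 3, 4, 4, 5, 5, 6]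
-- _MINOR_DEGREE = [0, 0, 1, 2, 2, 3, 3, 4, 5, 5, 6, 0]
--
--
-- def pitch_to_scale_degree(pitch: int, key: int, is_minor: bool) -> int:
--     """Convert MIDI pitch to scale degree (0-6) via a precomputed lookup table."""
--     relative_pc = (pitch % 12 - key) % 12
--     return (_MINOR_DEGREE if is_minor else _MAJOR_DEGREE)[relative_pc]
-- ===== Notes on version B (the rewrite author's own statement) =====
-- stated objective: faster
-- what changed: Replaces the per-call nearest-circular-distance scan over the 7-note scale with a single indexed lookup into a precomputed 12-entry degree table (one per relative pitch class), with A's earliest-index tie-break baked into the table.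
import Mathlib
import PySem

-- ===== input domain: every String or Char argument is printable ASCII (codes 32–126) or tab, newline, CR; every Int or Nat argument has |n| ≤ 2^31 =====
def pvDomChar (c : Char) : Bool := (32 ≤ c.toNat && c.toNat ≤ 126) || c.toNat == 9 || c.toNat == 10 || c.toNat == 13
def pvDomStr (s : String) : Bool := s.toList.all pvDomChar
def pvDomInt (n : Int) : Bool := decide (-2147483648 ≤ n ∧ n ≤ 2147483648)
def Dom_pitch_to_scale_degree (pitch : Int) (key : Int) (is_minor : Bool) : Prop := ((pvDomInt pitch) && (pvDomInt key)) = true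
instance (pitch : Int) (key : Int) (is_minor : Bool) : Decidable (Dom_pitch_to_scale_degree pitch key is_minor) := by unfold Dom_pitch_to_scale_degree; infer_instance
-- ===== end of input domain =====

-- B replaces the per-call 7-note nearest-distance scan with a lookup in a precomputed 12-entry degree table (constant-factor speed; unverified by timing).


-- ===== PORT A =====
-- literal transliteration of A: scan the 7-note scale keeping (best_deg, best_dist)
def pitch_to_scale_degree (pitch : Int) (key : Int) (is_minor : Bool) : Int :=
  let scale : List Int := if is_minor then [0, 2, 3, 5, 7, 8, 10] else [0, 2, 4, 5, 7, 9, 11]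
  let relative_pc := PySem.Int.mod (PySem.Int.mod pitch 12 - key) 12
  let st := (PySem.List.enumerate scale).foldl
    (fun (st : Int × Int) (p : Int × Int) =>
      let dist := min |relative_pc - p.2| (12 - |relative_pc - p.2|)
      if dist < st.2 then (p.1, dist) else st)
    (0, 99)
  st.1

-- ===== PORT B =====
-- precomputed degree tables, indexed by relative pitch class (always 0..11, so the lookup never misses)
def pvMajorDegree : List Int := [0, 0, 1, 1, 2, 3, 3, 4, 4, 5, 5, 6]
def pvMinorDegree : List Int := [0, 0, 1, 2, 2, 3, 3, 4, 5, 5, 6, 0]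

def pitch_to_scale_degree_alt (pitch : Int) (key : Int) (is_minor : Bool) : Int :=
  let relative_pc := PySem.Int.mod (PySem.Int.mod pitch 12 - key) 12
  PySem.List.pyGetD (if is_minor then pvMinorDegree else pvMajorDegree) relative_pc 0

-- ===== PRECONDITION & SPEC =====
def Spec_pitch_to_scale_degree (pitch : Int) (key : Int) (is_minor : Bool) (out : Int) : Prop := out = pitch_to_scale_degree_alt pitch key is_minor
instance (pitch : Int) (key : Int) (is_minor : Bool) (out : Int) : Decidable (Spec_pitch_to_scale_degree pitch key is_minor out) := by unfold Spec_pitch_to_scale_degree; infer_instance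

-- ===== CLAIM (what is proved, stated in full; the proofs are below) =====
def Claim_equal_pitch_to_scale_degree : Prop := ∀ (pitch : Int) (key : Int) (is_minor : Bool), Dom_pitch_to_scale_degree pitch key is_minor → Spec_pitch_to_scale_degree pitch key is_minor (pitch_to_scale_degree pitch key is_minor)

-- ===== LEMMAS AND PROOFS =====
-- both ports depend on the inputs only through relative_pc ∈ [0, 12); check the 12 × 2 cases
lemma core_eq (r : Int) (hr0 : 0 ≤ r) (hr : r < 12) (is_minor : Bool) :
    (let scale : List Int := if is_minor then [0, 2, 3, 5, 7, 8, 10] else [0, 2, 4, 5, 7, 9, 11]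
     ((PySem.List.enumerate scale).foldl
       (fun (st : Int × Int) (p : Int × Int) =>
         let dist := min |r - p.2| (12 - |r - p.2|)
         if dist < st.2 then (p.1, dist) else st)
       (0, 99)).1)
    = PySem.List.pyGetD (if is_minor then pvMinorDegree else pvMajorDegree) r 0 := by
  interval_cases r <;> cases is_minor <;> decide

-- ===== VERDICT (by name: the statement is the Claim_ definition above) =====
theorem pitch_to_scale_degree_spec : Claim_equal_pitch_to_scale_degree := by
  intro pitch key is_minor _
  show pitch_to_scale_degree pitch key is_minor = pitch_to_scale_degree_alt pitch key is_minor
  unfold pitch_to_scale_degree pitch_to_scale_degree_alt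
  exact core_eq _ (PySem.Int.mod_nonneg _ (by omega)) (PySem.Int.mod_lt _ (by omega)) is_minor
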